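-- pv_equiv track=rewrite | github.com/timesky/hermes-skills | skills/mcn/my-mcn-manager/scripts/poll-image-tasks.py | check_layout_ready
-- ===== SOURCE A (Python) =====
-- def check_layout_ready(tasks: dict) -> tuple:
--     """检查是否满足排版条件
--
--     条件：
--     1. 所有任务状态是 succeeded 或 failed（无 pending）
--     2. 成功图片数 >= 3
--     3. 必须包含：封面图(cover)、至少1张中间图(img_x)、尾图(end)
--
--     返回：(是否满足, 缺少原因)
--     """
--     succeeded = {k: v for k, v in tasks.items()
--                  if v.get('status') == 'succeeded'}
--
--     # 检查是否还有 pending 任务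
--     pending = [k for k, v in tasks.items() if v.get('status') == 'pending']
--     if pending:
--         return False, f"仍有 {len(pending)} 张待完成"
--
--     # 检查数量
--     if len(succeeded) < 3:
--         return False, f"图片不足：{len(succeeded)}/3"
--
--     # 检查类型
--     has_cover = any('cover' in k for k in succeeded.keys())
--     has_middle = any(k.startswith('img_') for k in succeeded.keys())
--     has_end = any('end' in k for k in succeeded.keys())
--
--     missing = []
--     if not has_cover:
--         missing.append("封面图")
--     if not has_middle:
--         missing.append("中间图")
--     if not has_end:
--         missing.append("尾图")
--
--     if missing:
--         return False, f"缺少：{', '.join(missing)}"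
--
--     return True, "满足条件"
-- ===== SOURCE B (Python) =====
-- def check_layout_ready(tasks: dict) -> tuple:
--     """Single pass: count statuses and accumulate type flags in one loop."""
--     succeeded_count = 0
--     pending_count = 0
--     has_cover = has_middle = has_end = False
--     for k, v in tasks.items():
--         status = v.get('status')
--         if status == 'pending':
--             pending_count += 1
--         elif status == 'succeeded':
--             succeeded_count += 1
--             has_cover = has_cover or ('cover' in k)
--             has_middle = has_middle or k.startswith('img_')
--             has_end = has_end or ('end' in k)
--     if pending_count:
--         return False, f"仍有 {pending_count} 张待完成"
--     if succeeded_count < 3: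
--         return False, f"图片不足：{succeeded_count}/3"
--     missing = [name for ok, name in
--                [(has_cover, "封面图"), (has_middle, "中间图"), (has_end, "尾图")]
--                if not ok]
--     if missing:
--         return False, f"缺少：{', '.join(missing)}"
--     return True, "满足条件"
-- ===== Notes on version B (the rewrite author's own statement) =====
-- stated objective: simpler
-- what changed: Replaces the dict comprehension, the pending list comprehension and three separate any() scans (five passes over the tasks) with one loop that counts pending/succeeded and ORs the three layout flags, plus a table-driven missing list.
import Mathlib
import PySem

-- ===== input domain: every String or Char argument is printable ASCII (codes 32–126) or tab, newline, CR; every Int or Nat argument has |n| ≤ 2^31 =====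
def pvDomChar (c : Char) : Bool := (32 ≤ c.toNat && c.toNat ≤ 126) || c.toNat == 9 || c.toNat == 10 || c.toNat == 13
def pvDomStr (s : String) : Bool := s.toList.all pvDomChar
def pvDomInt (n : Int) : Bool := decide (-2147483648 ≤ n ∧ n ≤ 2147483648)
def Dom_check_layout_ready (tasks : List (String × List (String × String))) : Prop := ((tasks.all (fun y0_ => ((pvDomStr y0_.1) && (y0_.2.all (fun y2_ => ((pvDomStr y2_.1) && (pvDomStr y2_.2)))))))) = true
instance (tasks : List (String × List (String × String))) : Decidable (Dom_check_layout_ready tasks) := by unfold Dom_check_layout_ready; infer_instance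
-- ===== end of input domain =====

-- B replaces A's five passes (dict comprehension, pending comprehension, three any() scans)
-- with one counting/flag-accumulating loop; objective: simpler.

-- ===== PORT A =====
def check_layout_ready (tasks : List (String × List (String × String))) : Bool × String :=
  let succeeded := tasks.filter (fun kv => (PySem.Dict.mk kv.2).get? "status" == some "succeeded")
  let pending := tasks.filter (fun kv => (PySem.Dict.mk kv.2).get? "status" == some "pending")
  if pending.length ≠ 0 then
    (false, "仍有 " ++ PySem.Int.toStr (pending.length : Int) ++ " 张待完成")
  else if succeeded.length < 3 then
    (false, "图片不足：" ++ PySem.Int.toStr (succeeded.length : Int) ++ "/3")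
  else
    let has_cover := succeeded.any (fun kv => PySem.Str.isIn "cover" kv.1)
    let has_middle := succeeded.any (fun kv => PySem.Str.startswith kv.1 "img_")
    let has_end := succeeded.any (fun kv => PySem.Str.isIn "end" kv.1)
    let missing := (if !has_cover then ["封面图"] else []) ++
                   (if !has_middle then ["中间图"] else []) ++
                   (if !has_end then ["尾图"] else [])
    if missing ≠ [] then (false, "缺少：" ++ PySem.Str.join ", " missing)
    else (true, "满足条件")

-- ===== PORT B =====
def clr_step (st : Nat × Nat × Bool × Bool × Bool) (kv : String × List (String × String)) :
    Nat × Nat × Bool × Bool × Bool :=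
  let (sc, pc, hc, hm, he) := st
  let status := (PySem.Dict.mk kv.2).get? "status"
  if status == some "pending" then (sc, pc + 1, hc, hm, he)
  else if status == some "succeeded" then
    (sc + 1, pc, hc || PySem.Str.isIn "cover" kv.1,
     hm || PySem.Str.startswith kv.1 "img_",
     he || PySem.Str.isIn "end" kv.1)
  else (sc, pc, hc, hm, he)

def check_layout_ready_alt (tasks : List (String × List (String × String))) : Bool × String :=
  let (sc, pc, hc, hm, he) := tasks.foldl clr_step (0, 0, false, false, false)
  if pc ≠ 0 then
    (false, "仍有 " ++ PySem.Int.toStr (pc : Int) ++ " 张待完成")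
  else if sc < 3 then
    (false, "图片不足：" ++ PySem.Int.toStr (sc : Int) ++ "/3")
  else
    let missing := [(hc, "封面图"), (hm, "中间图"), (he, "尾图")].filterMap
      (fun p => if !p.1 then some p.2 else none)
    if missing ≠ [] then (false, "缺少：" ++ PySem.Str.join ", " missing)
    else (true, "满足条件")

-- ===== PRECONDITION & SPEC =====
def Spec_check_layout_ready (tasks : List (String × List (String × String))) (out : Bool × String) : Prop := out = check_layout_ready_alt tasks
instance (tasks : List (String × List (String × String))) (out : Bool × String) : Decidable (Spec_check_layout_ready tasks out) := by unfold Spec_check_layout_ready; infer_instance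

-- ===== CLAIM (what is proved, stated in full; the proofs are below) =====
def Claim_equal_check_layout_ready : Prop := ∀ (tasks : List (String × List (String × String))), Dom_check_layout_ready tasks → Spec_check_layout_ready tasks (check_layout_ready tasks)

-- ===== LEMMAS AND PROOFS =====

def clr_succP (kv : String × List (String × String)) : Bool :=
  (PySem.Dict.mk kv.2).get? "status" == some "succeeded"

def clr_pendP (kv : String × List (String × String)) : Bool :=
  (PySem.Dict.mk kv.2).get? "status" == some "pending"

lemma clr_loop_spec (tasks : List (String × List (String × String)))
    (sc pc : Nat) (hc hm he : Bool) :
    tasks.foldl clr_step (sc, pc, hc, hm, he) =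
      (sc + (tasks.filter clr_succP).length,
       pc + (tasks.filter clr_pendP).length,
       hc || (tasks.filter clr_succP).any (fun kv => PySem.Str.isIn "cover" kv.1),
       hm || (tasks.filter clr_succP).any (fun kv => PySem.Str.startswith kv.1 "img_"),
       he || (tasks.filter clr_succP).any (fun kv => PySem.Str.isIn "end" kv.1)) := by
  induction tasks generalizing sc pc hc hm he with
  | nil => simp
  | cons kv rest ih =>
    by_cases hp : clr_pendP kv = true
    · have hs : clr_succP kv = false := by
        simp [clr_succP, clr_pendP] at *
        simp [hp]
      simp only [List.foldl_cons, clr_step, List.filter_cons, hp, hs]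
      have : ((PySem.Dict.mk kv.2).get? "status" == some "pending") = true := hp
      simp only [this]
      rw [ih]
      simp; omega
    · by_cases hs : clr_succP kv = true
      · simp only [List.foldl_cons, clr_step, List.filter_cons, hs]
        have hp' : ((PySem.Dict.mk kv.2).get? "status" == some "pending") = false := by
          simpa [clr_pendP] using hp
        have hs' : ((PySem.Dict.mk kv.2).get? "status" == some "succeeded") = true := hs
        simp only [hp', hs', Bool.false_eq_true, if_false]
        rw [ih]
        simp [clr_pendP, hp', Bool.or_assoc]
        omega
      · have hp' : ((PySem.Dict.mk kv.2).get? "status" == some "pending") = false := by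
          simpa [clr_pendP] using hp
        have hs' : ((PySem.Dict.mk kv.2).get? "status" == some "succeeded") = false := by
          simpa [clr_succP] using hs
        simp only [List.foldl_cons, clr_step, List.filter_cons, clr_pendP, clr_succP,
          hp', hs', Bool.false_eq_true, if_false]
        exact ih sc pc hc hm he

-- ===== VERDICT (by name: the statement is the Claim_ definition above) =====
theorem check_layout_ready_spec : Claim_equal_check_layout_ready := by
  intro tasks _
  unfold Spec_check_layout_ready check_layout_ready check_layout_ready_alt
  rw [clr_loop_spec]
  simp only [Nat.zero_add, Bool.false_or]
  set succ := tasks.filter clr_succP with hsu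
  set pend := tasks.filter clr_pendP with hpe
  have e1 : tasks.filter (fun kv => (PySem.Dict.mk kv.2).get? "status" == some "succeeded") = succ := rfl
  have e2 : tasks.filter (fun kv => (PySem.Dict.mk kv.2).get? "status" == some "pending") = pend := rfl
  rw [e1, e2]
  by_cases h1 : pend.length ≠ 0
  · simp [h1]
  · simp only [h1, if_false]
    by_cases h2 : succ.length < 3
    · simp [h2]
    · simp only [h2]
      cases hc : succ.any (fun kv => PySem.Str.isIn "cover" kv.1) <;>
      cases hm : succ.any (fun kv => PySem.Str.startswith kv.1 "img_") <;>
      cases he : succ.any (fun kv => PySem.Str.isIn "end" kv.1) <;>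
        simp [List.filterMap]
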